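-- pv_equiv track=rewrite | github.com/hwanginbeom/algorithm_study | WeeklyChallenge/WeeklyChallenge01_sejin.py | solution
-- ===== SOURCE A (Python) =====
-- def solution(price, money, count):
--     fee = 0
--     for i in range(1, count+1):
--         fee += price*i
--
--     if money >= fee:
--         return 0
--     else:
--         return fee-money
-- ===== SOURCE B (Python) =====
-- def solution(price, money, count):
--     fee = price * count * (count + 1) // 2 if count > 0 else 0
--     return max(0, fee - money)
-- ===== Notes on version B (the rewrite author's own statement) =====
-- stated objective: faster
-- what changed: replaces the O(count) summation loop with the closed-form arithmetic-series formula price*count*(count+1)//2 and an explicit max for the shortfall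
import Mathlib
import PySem

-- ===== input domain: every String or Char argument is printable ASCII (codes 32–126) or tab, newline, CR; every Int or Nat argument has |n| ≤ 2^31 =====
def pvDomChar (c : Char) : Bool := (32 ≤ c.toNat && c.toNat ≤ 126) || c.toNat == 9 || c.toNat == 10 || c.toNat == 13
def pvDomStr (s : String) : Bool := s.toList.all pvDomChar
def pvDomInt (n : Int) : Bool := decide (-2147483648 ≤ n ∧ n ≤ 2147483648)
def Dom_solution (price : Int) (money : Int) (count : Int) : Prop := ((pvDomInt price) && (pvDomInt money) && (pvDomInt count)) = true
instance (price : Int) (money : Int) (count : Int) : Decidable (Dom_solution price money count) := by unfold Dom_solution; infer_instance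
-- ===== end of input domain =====

-- B replaces A's O(count) summation loop with the closed-form series formula (faster, asymptotic).
-- ===== PORT A =====
def solution (price : Int) (money : Int) (count : Int) : Int :=
  let fee := (PySem.List.pyRange 1 (count + 1) 1).foldl (fun fee i => fee + price * i) 0
  if money ≥ fee then 0 else fee - money

-- ===== PORT B =====
def solution_alt (price : Int) (money : Int) (count : Int) : Int :=
  let fee := if count > 0 then PySem.Int.floordiv (price * count * (count + 1)) 2 else 0
  max 0 (fee - money)

-- ===== PRECONDITION & SPEC =====
def Spec_solution (price : Int) (money : Int) (count : Int) (out : Int) : Prop := out = solution_alt price money count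
instance (price : Int) (money : Int) (count : Int) (out : Int) : Decidable (Spec_solution price money count out) := by unfold Spec_solution; infer_instance

-- ===== CLAIM (what is proved, stated in full; the proofs are below) =====
def Claim_equal_solution : Prop := ∀ (price : Int) (money : Int) (count : Int), Dom_solution price money count → Spec_solution price money count (solution price money count)

-- ===== LEMMAS AND PROOFS =====

-- the loop of A sums the arithmetic series: doubled to stay division-free
theorem pv_sum_loop (price : Int) : ∀ (n : Nat) (s : Int),
    2 * (PySem.List.pyRange 1 ((n : Int) + 1) 1).foldl (fun fee i => fee + price * i) s
      = 2 * s + price * n * (n + 1) := by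
  intro n
  induction n with
  | zero => intro s; simp [PySem.List.pyRange_one_eq_nil]
  | succ m ih =>
    intro s
    rw [show ((m + 1 : Nat) : Int) = (m : Int) + 1 by push_cast; ring,
      show ((m : Int) + 1 + 1) = ((m : Int) + 1) + 1 by ring,
      PySem.List.pyRange_one_succ_right (by omega), List.foldl_append]
    simp only [List.foldl_cons, List.foldl_nil]
    calc 2 * ((PySem.List.pyRange 1 ((m : Int) + 1) 1).foldl (fun fee i => fee + price * i) s + price * ((m : Int) + 1))
        = 2 * (PySem.List.pyRange 1 ((m : Int) + 1) 1).foldl (fun fee i => fee + price * i) s + 2 * (price * ((m : Int) + 1)) := by ring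
      _ = 2 * s + price * m * (m + 1) + 2 * (price * ((m : Int) + 1)) := by rw [ih]
      _ = 2 * s + price * ((m : Int) + 1) * ((m : Int) + 1 + 1) := by ring

theorem pv_closed (price : Int) (n : Nat) :
    (PySem.List.pyRange 1 ((n : Int) + 1) 1).foldl (fun fee i => fee + price * i) 0
      = price * n * (n + 1) / 2 := by
  have h := pv_sum_loop price n 0
  omega

-- ===== VERDICT (by name: the statement is the Claim_ definition above) =====
theorem solution_spec : Claim_equal_solution := by
  intro price money count _
  unfold Spec_solution solution solution_alt
  by_cases hc : count > 0
  · obtain ⟨n, rfl⟩ : ∃ n : Nat, count = (n : Int) := ⟨count.toNat, (Int.toNat_of_nonneg (le_of_lt hc)).symm⟩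
    rw [pv_closed]
    rw [PySem.Int.floordiv_eq_ediv_of_pos (by norm_num)]
    simp only [hc, if_pos]
    rcases le_or_gt money (price * n * (n + 1) / 2) with h | h <;> omega
  · have : count + 1 ≤ 1 := by omega
    rw [PySem.List.pyRange_one_eq_nil this]
    simp only [List.foldl_nil, hc, if_false]
    rcases le_or_gt money 0 with h | h
    · simp [h]; omega
    · simp; omega
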